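-- pv_equiv track=rewrite | github.com/drakaas/projetPython | ulbloque.py | parse_cars
-- ===== SOURCE A (Python) =====
-- def parse_cars(data: list[str]) -> list[list[tuple[int, int], str, int]]:
--      cars = [line[1:-1] for line in data[1:-2]]
--      car_dict: dict[str, list[tuple[int, int], str, int]] = {}
--
--
--      for row_index, row in enumerate(cars):
--           previous = ''
--           for col_index, char in enumerate(row):#
--                if char == '.':
--                     previous = '.'
--                     continue
--                if char in car_dict:
--                     if not car_dict[char][1]:
--                          car_dict[char][1] = 'h' if previous == char else 'v'
--                     car_dict[char][2] += 1
--                else: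
--                     car_dict[char] = [(col_index, row_index), '', 1]
--
--                previous = char
--      #on elimine la lettre liée a chaque voiture et on garde uniquement la liste [(x,y),direction,taille]
--      return [value for key, value in sorted(car_dict.items(), key=lambda item: item[0])]
-- ===== SOURCE B (Python) =====
-- def _car(pts):
--     if len(pts) > 1:
--         x, y = pts[0]
--         direction = 'h' if pts[1] == (x + 1, y) else 'v'
--     else:
--         direction = ''
--     return [pts[0], direction, len(pts)]
--
--
-- def parse_cars(data: list[str]) -> list[list[tuple[int, int], str, int]]:
--     grid = [line[1:-1] for line in data[1:-2]]
--     pts = [(ch, (c, r)) for r, row in enumerate(grid) for c, ch in enumerate(row) if ch != '.']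
--     cells = {}
--     for ch, p in pts:
--         cells.setdefault(ch, []).append(p)
--     return [_car(cells[k]) for k in sorted(cells)]
-- ===== Notes on version B (the rewrite author's own statement) =====
-- stated objective: alternative
-- what changed: Replaces A's inline previous-char state machine that classifies and counts cars while scanning with a collect-then-classify decomposition: one pass gathers each letter's cells in reading order into a dict of lists, then each car is classified from its first two cells and its length, over the sorted letters.
import Mathlib
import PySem

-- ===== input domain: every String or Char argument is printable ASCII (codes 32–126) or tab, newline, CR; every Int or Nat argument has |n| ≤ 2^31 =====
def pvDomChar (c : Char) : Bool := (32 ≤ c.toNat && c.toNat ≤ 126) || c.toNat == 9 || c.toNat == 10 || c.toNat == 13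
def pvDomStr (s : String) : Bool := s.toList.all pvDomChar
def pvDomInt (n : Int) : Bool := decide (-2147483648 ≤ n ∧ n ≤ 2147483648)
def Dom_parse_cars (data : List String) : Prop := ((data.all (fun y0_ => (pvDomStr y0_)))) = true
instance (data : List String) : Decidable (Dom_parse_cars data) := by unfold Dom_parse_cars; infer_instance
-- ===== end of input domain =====

-- B replaces A's inline previous-char state machine with a collect-then-classify decomposition (alternative, same cost).
-- Python dict keys are the 1-character strings of grid letters; both ports model them as Char (string order on
-- 1-character ASCII strings is code-point order, so 'sorted' agrees). A's 'previous' variable ranges over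
-- '' / '.' / a letter string; the port models it as Option Char (none = '').

-- ===== PORT A =====
-- step of A's inner loop over one row (state = (car_dict, previous))
def pvStepA (row_index : Int)
    (st : PySem.Dict Char ((Int × Int) × String × Int) × Option Char) (cp : Int × Char) :
    PySem.Dict Char ((Int × Int) × String × Int) × Option Char :=
  let d := st.1
  let previous := st.2
  let col_index := cp.1
  let char := cp.2
  if char = '.' then (d, some '.')
  else
    match d.get? char with
    | some (pos, dir, n) =>
        -- 'if not car_dict[char][1]' then set direction, and always count += 1
        let dir' := if dir = "" then (if previous = some char then "h" else "v") else dir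
        (d.insert char (pos, dir', n + 1), some char)
    | none => (d.insert char ((col_index, row_index), "", 1), some char)

def parse_cars (data : List String) : List ((Int × Int) × String × Int) :=
  let cars := (PySem.List.slice data (some 1) (some (-2))).map
      (fun line => PySem.Str.slice line (some 1) (some (-1)))
  let car_dict := (PySem.List.enumerate cars 0).foldl
      (fun d rp => ((PySem.List.enumerate rp.2.toList 0).foldl (pvStepA rp.1) (d, none)).1)
      PySem.Dict.empty
  (PySem.List.sorted car_dict.items (fun item => item.1) false).map (fun item => item.2)

-- ===== PORT B =====
-- _car(pts): classify a car from its cell list (pts is never [] in B; the [] case is an arbitrary default)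
def pvCar : List (Int × Int) → ((Int × Int) × String × Int)
  | [] => ((0, 0), "", 0)
  | [p] => (p, "", 1)
  | p :: q :: rest => (p, (if q = (p.1 + 1, p.2) then "h" else "v"), ((rest.length : Int) + 2))

def parse_cars_alt (data : List String) : List ((Int × Int) × String × Int) :=
  let grid := (PySem.List.slice data (some 1) (some (-2))).map
      (fun line => PySem.Str.slice line (some 1) (some (-1)))
  let pts := (PySem.List.enumerate grid 0).flatMap (fun rp =>
      ((PySem.List.enumerate rp.2.toList 0).filter (fun cp => !(cp.2 == '.'))).map
        (fun cp => (cp.2, (cp.1, rp.1))))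
  let cells := pts.foldl (fun d p => d.modify p.1 [] (· ++ [p.2])) PySem.Dict.empty
  (PySem.List.sorted cells.keys (fun k => k) false).map (fun k => pvCar (cells.getD k []))

-- ===== PRECONDITION & SPEC =====
def Spec_parse_cars (data : List String) (out : List ((Int × Int) × String × Int)) : Prop := out = parse_cars_alt data
instance (data : List String) (out : List ((Int × Int) × String × Int)) : Decidable (Spec_parse_cars data out) := by unfold Spec_parse_cars; infer_instance

-- ===== CLAIM (what is proved, stated in full; the proofs are below) =====
def Claim_equal_parse_cars : Prop := ∀ (data : List String), Dom_parse_cars data → Spec_parse_cars data (parse_cars data)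

-- ===== LEMMAS AND PROOFS =====

-- "if the list is empty, no dict entry; otherwise the entry"
def pvOptOf {α : Type} (l : List α) : Option (List α) := if l = [] then none else some l

-- occurrences of letter k (k ≠ '.') in one row, columns counted from c, row index r
def pvOccR (k : Char) (r : Int) : List Char → Int → List (Int × Int)
  | [], _ => []
  | ch :: rest, c => (if ch = k ∧ ch ≠ '.' then [(c, r)] else []) ++ pvOccR k r rest (c + 1)

lemma pvOccR_row (p : Int × Int) (k : Char) (r : Int) :
    ∀ (row : List Char) (c : Int), p ∈ pvOccR k r row c → p.2 = r := by
  intro row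
  induction row with
  | nil => intro c h; simp [pvOccR] at h
  | cons ch rest ih =>
      intro c h
      simp only [pvOccR, List.mem_append] at h
      rcases h with h | h
      · split at h <;> simp_all
      · exact ih _ h

-- the row-level bridge: B's per-row cell contribution, filtered to letter k, is pvOccR
lemma pvRowBridge (k : Char) (r : Int) :
    ∀ (row : List Char) (c : Int),
      (((((PySem.List.enumerate row c).filter (fun cp => !(cp.2 == '.'))).map
          (fun cp => (cp.2, (cp.1, r)))).filter (fun p => p.1 == k)).map (fun p => p.2))
        = pvOccR k r row c := by
  intro row
  induction row with
  | nil => intro c; simp [PySem.List.enumerate_nil, pvOccR]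
  | cons ch rest ih =>
      intro c
      rw [PySem.List.enumerate_cons]
      by_cases hd : ch = '.'
      · subst hd
        simp [pvOccR, ih]
      · by_cases hk : ch = k
        · subst hk
          simp [pvOccR, hd, ih]
        · simp [pvOccR, hd, hk, ih]

-- the per-step computation on a letter cell: A's dict update equals classify-after-append
lemma pvStepA_entry (r s : Int) (ch : Char) (hd : ch ≠ '.')
    (a : PySem.Dict Char ((Int × Int) × String × Int)) (prev : Option Char)
    (O : Char → List (Int × Int))
    (h1 : ∀ k, a.get? k = (pvOptOf (O k)).map pvCar)
    (h3 : prev = some ch ↔ (s - 1, r) ∈ O ch) :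
    pvStepA r (a, prev) (s, ch) = (a.insert ch (pvCar (O ch ++ [(s, r)])), some ch) := by
  have hget := h1 ch
  cases hO : O ch with
  | nil =>
      rw [hO] at hget
      simp only [pvOptOf, if_pos] at hget
      simp at hget
      simp [pvStepA, hd, hget, pvCar]
  | cons p tl =>
      rw [hO] at hget
      rw [hO] at h3
      obtain ⟨x, y⟩ := p
      cases tl with
      | nil =>
          simp only [pvOptOf, List.cons_ne_nil] at hget
          rw [if_neg (by simp)] at hget
          have hdir : (if prev = some ch then "h" else "v")
              = (if ((s, r) : Int × Int) = (x + 1, y) then "h" else "v") := by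
            by_cases hp : prev = some ch
            · have hm := h3.mp hp
              simp only [List.mem_singleton, Prod.mk.injEq] at hm
              have : ((s, r) : Int × Int) = (x + 1, y) := by
                simp only [Prod.mk.injEq]; omega
              simp [hp, this]
            · have hns : ¬ ((s, r) : Int × Int) = (x + 1, y) := by
                intro hc
                simp only [Prod.mk.injEq] at hc
                exact hp (h3.mpr (by simp only [List.mem_singleton, Prod.mk.injEq]; omega))
              simp [hp, hns]
          simp [pvStepA, hd, hget, pvCar, hdir]
      | cons q rest =>
          simp only [pvOptOf, List.cons_ne_nil] at hget
          rw [if_neg (by simp)] at hget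
          by_cases hq : q = (((x : Int) + 1, (y : Int)) : Int × Int)
          · simp [pvStepA, hd, hget, pvCar, hq]
            congr 1
          · simp [pvStepA, hd, hget, pvCar, hq]
            congr 1

-- inner loop of A over one row: dict characterization carried through the 'previous' state machine
lemma pvInnerA :
    ∀ (row : List Char) (s r : Int) (a : PySem.Dict Char ((Int × Int) × String × Int))
      (prev : Option Char) (O : Char → List (Int × Int)),
      (∀ k, a.get? k = (pvOptOf (O k)).map pvCar) →
      a.keys.Nodup →
      (∀ k p, p ∈ O k → p.2 < r ∨ (p.2 = r ∧ p.1 < s)) →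
      (∀ k, k ≠ '.' → (prev = some k ↔ (s - 1, r) ∈ O k)) →
      (∀ k, ((PySem.List.enumerate row s).foldl (pvStepA r) (a, prev)).1.get? k
          = (pvOptOf (O k ++ pvOccR k r row s)).map pvCar)
      ∧ ((PySem.List.enumerate row s).foldl (pvStepA r) (a, prev)).1.keys.Nodup := by
  intro row
  induction row with
  | nil =>
      intro s r a prev O h1 hN h2 h3
      simpa [PySem.List.enumerate_nil, pvOccR] using ⟨h1, hN⟩
  | cons ch rest ih =>
      intro s r a prev O h1 hN h2 h3
      rw [PySem.List.enumerate_cons]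
      simp only [List.foldl_cons]
      by_cases hd : ch = '.'
      · -- '.' cell: dict unchanged, previous := '.'
        subst hd
        have hstep : pvStepA r (a, prev) (s, '.') = (a, some '.') := by
          simp [pvStepA]
        rw [hstep]
        have h2' : ∀ k p, p ∈ O k → p.2 < r ∨ (p.2 = r ∧ p.1 < s + 1) := by
          intro k p hp; rcases h2 k p hp with h | h
          · exact Or.inl h
          · exact Or.inr ⟨h.1, by omega⟩
        have h3' : ∀ k, k ≠ '.' → ((some '.' : Option Char) = some k ↔ (s + 1 - 1, r) ∈ O k) := by
          intro k hk
          constructor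
          · intro h; exact absurd (Option.some.inj h).symm hk
          · intro h
            rcases h2 k _ h with h' | h' <;> simp at h'
        have := ih (s + 1) r a (some '.') O h1 hN h2' h3'
        simpa [pvOccR] using this
      · -- a letter cell
        have hgo : O ch ++ pvOccR ch r (ch :: rest) s
            = (O ch ++ [(s, r)]) ++ pvOccR ch r rest (s + 1) := by
          simp [pvOccR, hd]
        set O' : Char → List (Int × Int) :=
          fun j => if j = ch then O ch ++ [(s, r)] else O j with hO'
        have hOccSplit : ∀ k, O k ++ pvOccR k r (ch :: rest) s = O' k ++ pvOccR k r rest (s + 1) := by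
          intro k
          by_cases hk : k = ch
          · subst hk; simpa [hO'] using hgo
          · have : ¬ (ch = k ∧ ch ≠ '.') := by
              intro hc; exact hk hc.1.symm
            simp [pvOccR, this, hO', hk]
        -- the step produces (a.insert ch e, some ch) with e = pvCar (O ch ++ [(s,r)])
        have hstep : pvStepA r (a, prev) (s, ch)
            = (a.insert ch (pvCar (O ch ++ [(s, r)])), some ch) :=
          pvStepA_entry r s ch hd a prev O h1 (h3 ch hd)
        rw [hstep]
        have h1' : ∀ k, (a.insert ch (pvCar (O ch ++ [(s, r)]))).get? k
            = (pvOptOf (O' k)).map pvCar := by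
          intro k
          by_cases hk : k = ch
          · subst hk
            rw [PySem.Dict.get?_insert_self]
            simp [hO', pvOptOf]
          · rw [PySem.Dict.get?_insert_of_ne _ _ hk]
            simp [hO', hk, h1 k]
        have hN' : (a.insert ch (pvCar (O ch ++ [(s, r)]))).keys.Nodup :=
          PySem.Dict.nodup_keys_insert _ _ _ hN
        have h2' : ∀ k p, p ∈ O' k → p.2 < r ∨ (p.2 = r ∧ p.1 < s + 1) := by
          intro k p hp
          by_cases hk : k = ch
          · subst hk
            simp only [hO', if_pos rfl, List.mem_append, List.mem_singleton] at hp
            rcases hp with hp | hp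
            · rcases h2 _ p hp with h | h
              · exact Or.inl h
              · exact Or.inr ⟨h.1, by omega⟩
            · subst hp; exact Or.inr ⟨rfl, by omega⟩
          · simp only [hO', if_neg hk] at hp
            rcases h2 k p hp with h | h
            · exact Or.inl h
            · exact Or.inr ⟨h.1, by omega⟩
        have h3' : ∀ k, k ≠ '.' → ((some ch : Option Char) = some k ↔ (s + 1 - 1, r) ∈ O' k) := by
          intro k hk
          by_cases hkc : k = ch
          · subst hkc
            simp [hO']
          · constructor
            · intro h; exact absurd (Option.some.inj h) (fun h' => hkc h'.symm)
            · intro h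
              simp only [hO', if_neg hkc] at h
              rcases h2 k _ h with h' | h' <;> simp at h'
        have := ih (s + 1) r _ (some ch) O' h1' hN' h2' h3'
        refine ⟨fun k => ?_, this.2⟩
        rw [hOccSplit k]
        exact (this.1 k)

-- outer loop of A over the rows
lemma pvOuterA :
    ∀ (rows : List String) (r : Int) (a : PySem.Dict Char ((Int × Int) × String × Int))
      (O : Char → List (Int × Int)),
      (∀ k, a.get? k = (pvOptOf (O k)).map pvCar) →
      a.keys.Nodup →
      (∀ k p, p ∈ O k → p.2 < r) →
      (∀ k, ((PySem.List.enumerate rows r).foldl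
          (fun d rp => ((PySem.List.enumerate rp.2.toList 0).foldl (pvStepA rp.1) (d, none)).1) a).get? k
          = (pvOptOf (O k ++ (PySem.List.enumerate rows r).flatMap
              (fun rp => pvOccR k rp.1 rp.2.toList 0))).map pvCar)
      ∧ ((PySem.List.enumerate rows r).foldl
          (fun d rp => ((PySem.List.enumerate rp.2.toList 0).foldl (pvStepA rp.1) (d, none)).1) a).keys.Nodup := by
  intro rows
  induction rows with
  | nil =>
      intro r a O h1 hN h2
      simpa [PySem.List.enumerate_nil] using ⟨h1, hN⟩
  | cons row rest ih =>
      intro r a O h1 hN h2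
      rw [PySem.List.enumerate_cons]
      simp only [List.foldl_cons]
      have h2i : ∀ k p, p ∈ O k → p.2 < r ∨ (p.2 = r ∧ p.1 < 0) := by
        intro k p hp; exact Or.inl (h2 k p hp)
      have h3i : ∀ k, k ≠ '.' → ((none : Option Char) = some k ↔ ((0 : Int) - 1, r) ∈ O k) := by
        intro k hk
        constructor
        · intro h; simp at h
        · intro h; have := h2 k _ h; simp at this
      obtain ⟨hA, hAN⟩ := pvInnerA row.toList 0 r a none O h1 hN h2i h3i
      have h2' : ∀ k p, p ∈ (fun j => O j ++ pvOccR j r row.toList 0) k → p.2 < r + 1 := by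
        intro k p hp
        simp only [List.mem_append] at hp
        rcases hp with hp | hp
        · have := h2 k p hp; omega
        · have := pvOccR_row p k r row.toList 0 hp; omega
      have := ih (r + 1) _ (fun j => O j ++ pvOccR j r row.toList 0) hA hAN h2'
      refine ⟨fun k => ?_, this.2⟩
      rw [List.flatMap_cons, ← List.append_assoc]
      exact this.1 k

-- ===== final assembly =====

-- proof-side names for the two folds and the occurrence lists (definitionally the ports' bodies)
def pvPts (grid : List String) : List (Char × (Int × Int)) :=
  (PySem.List.enumerate grid 0).flatMap (fun rp =>
      ((PySem.List.enumerate rp.2.toList 0).filter (fun cp => !(cp.2 == '.'))).map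
        (fun cp => (cp.2, (cp.1, rp.1))))

def pvOCC (grid : List String) (k : Char) : List (Int × Int) :=
  (PySem.List.enumerate grid 0).flatMap (fun rp => pvOccR k rp.1 rp.2.toList 0)

def pvDictA (grid : List String) : PySem.Dict Char ((Int × Int) × String × Int) :=
  (PySem.List.enumerate grid 0).foldl
      (fun d rp => ((PySem.List.enumerate rp.2.toList 0).foldl (pvStepA rp.1) (d, none)).1)
      PySem.Dict.empty

def pvCellsD (grid : List String) : PySem.Dict Char (List (Int × Int)) :=
  (pvPts grid).foldl (fun d p => d.modify p.1 [] (· ++ [p.2])) PySem.Dict.empty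

lemma pvOCC_eq_filter (grid : List String) (k : Char) :
    pvOCC grid k = ((pvPts grid).filter (fun p => p.1 == k)).map (fun p => p.2) := by
  unfold pvOCC pvPts
  rw [List.filter_flatMap, List.map_flatMap]
  congr 1
  funext rp
  exact (pvRowBridge k rp.1 rp.2.toList 0).symm

lemma pvCellsGetD (grid : List String) (k : Char) :
    (pvCellsD grid).getD k [] = pvOCC grid k := by
  unfold pvCellsD
  rw [PySem.Dict.getD_foldl_modify_append, PySem.Dict.getD_empty, List.nil_append,
    pvOCC_eq_filter]

lemma pvCellsKeys (grid : List String) :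
    (pvCellsD grid).keys = PySem.Set.ofList ((pvPts grid).map (fun p => p.1)) := by
  unfold pvCellsD
  rw [PySem.Dict.keys_foldl_modify_key (pvPts grid) (fun p => p.1) []
    (fun _ p => (fun x => x ++ [p.2]))]
  rw [PySem.Dict.keys_empty, PySem.Set.update_nil_left]

lemma pvCellsNodup (grid : List String) : (pvCellsD grid).keys.Nodup := by
  rw [pvCellsKeys]
  exact PySem.Set.nodup_ofList _

lemma pvOCC_ne_iff (grid : List String) (k : Char) :
    pvOCC grid k ≠ [] ↔ k ∈ (pvPts grid).map (fun p => p.1) := by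
  rw [pvOCC_eq_filter]
  simp only [ne_eq, List.map_eq_nil_iff, List.filter_eq_nil_iff, beq_iff_eq, List.mem_map,
    not_forall]
  constructor
  · rintro ⟨p, hp, h⟩
    exact ⟨p, hp, by simpa using h⟩
  · rintro ⟨p, hp, h⟩
    exact ⟨p, hp, by simpa using h⟩

theorem pvAssemble (grid : List String) :
    (PySem.List.sorted (pvDictA grid).items (fun item => item.1) false).map (fun item => item.2)
    = (PySem.List.sorted (pvCellsD grid).keys (fun k => k) false).map
        (fun k => pvCar ((pvCellsD grid).getD k [])) := by
  obtain ⟨hA', hAN⟩ := pvOuterA grid 0 PySem.Dict.empty (fun _ => [])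
      (fun k => by simp [pvOptOf, PySem.Dict.get?_empty])
      (by simp [PySem.Dict.keys_empty])
      (fun k p hp => by simp at hp)
  have hA : ∀ k, (pvDictA grid).get? k = (pvOptOf (pvOCC grid k)).map pvCar := by
    intro k
    have := hA' k
    simpa [pvDictA, pvOCC] using this
  have hBN := pvCellsNodup grid
  have hmemA : ∀ k, k ∈ (pvDictA grid).keys ↔ pvOCC grid k ≠ [] := by
    intro k
    have hnone := PySem.Dict.get?_eq_none_iff_not_mem_keys (pvDictA grid) k
    have h1 : (pvDictA grid).get? k = none ↔ pvOCC grid k = [] := by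
      rw [hA k]; unfold pvOptOf; split_ifs with h <;> simp [h]
    constructor
    · intro hk h0
      exact (hnone.mp (h1.mpr h0)) hk
    · intro hocc
      by_contra hk
      exact hocc (h1.mp (hnone.mpr hk))
  have hmemB : ∀ k, k ∈ (pvCellsD grid).keys ↔ pvOCC grid k ≠ [] := by
    intro k
    rw [pvCellsKeys, PySem.Set.mem_ofList]
    exact (pvOCC_ne_iff grid k).symm
  have hperm : (pvDictA grid).keys.Perm (pvCellsD grid).keys :=
    (List.perm_ext_iff_of_nodup hAN hBN).mpr (fun k => (hmemA k).trans (hmemB k).symm)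
  have ksperm : (PySem.List.sorted (pvCellsD grid).keys (fun k => k) false).Perm
      (pvCellsD grid).keys := PySem.List.sorted_perm _ _ _
  have ksnodup : (PySem.List.sorted (pvCellsD grid).keys (fun k => k) false).Nodup :=
    (ksperm.nodup_iff).mpr hBN
  have ksle : (PySem.List.sorted (pvCellsD grid).keys (fun k => k) false).Pairwise
      (fun a b => a ≤ b) := by
    simpa using PySem.List.sorted_pairwise (pvCellsD grid).keys (fun k => k)
  have kslt : (PySem.List.sorted (pvCellsD grid).keys (fun k => k) false).Pairwise
      (fun a b => a < b) :=
    (ksle.and ksnodup).imp (fun h => lt_of_le_of_ne h.1 h.2)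
  have ditems : (pvDictA grid).items
      = (pvDictA grid).keys.map (fun k => (k, pvCar (pvOCC grid k))) := by
    rw [PySem.Dict.items_eq_map_keys (pvDictA grid) hAN (((0, 0) : Int × Int), ("", (0 : Int)))]
    apply List.map_congr_left
    intro k hk
    have hocc := (hmemA k).mp hk
    have hsome : (pvDictA grid).get? k = some (pvCar (pvOCC grid k)) := by
      rw [hA k]; unfold pvOptOf; rw [if_neg hocc]; rfl
    rw [PySem.Dict.getD_of_get?_eq_some _ _ hsome]
  have hsorted : PySem.List.sorted (pvDictA grid).items (fun item => item.1) false
      = (PySem.List.sorted (pvCellsD grid).keys (fun k => k) false).map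
          (fun k => (k, pvCar (pvOCC grid k))) := by
    apply PySem.List.sorted_eq_of_perm_of_pairwise_lt
    · rw [ditems]
      exact (ksperm.trans hperm.symm).map _
    · exact List.pairwise_map.mpr (by simpa using kslt)
  rw [hsorted, List.map_map]
  apply List.map_congr_left
  intro k hk
  simp [Function.comp, pvCellsGetD]

theorem parse_cars_spec_aux (data : List String) : parse_cars data = parse_cars_alt data :=
  pvAssemble ((PySem.List.slice data (some 1) (some (-2))).map
    (fun line => PySem.Str.slice line (some 1) (some (-1))))

-- ===== VERDICT (by name: the statement is the Claim_ definition above) =====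
theorem parse_cars_spec : Claim_equal_parse_cars := by
  intro data _
  exact parse_cars_spec_aux data
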